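-- pv_equiv track=rewrite | github.com/daibiaoxuwu/pinyin | listm1.py | listtags
-- ===== SOURCE A (Python) =====
-- def listtags(text,smdict):
--     for i in range(0,len(text)-2):
--         word=text[i]
--         word2=text[i+1]
--         word3=text[i+2]
--         if word in smdict:
--             bigdict=smdict[word]
--             if word2 in bigdict:
--                 thrdict=bigdict[word2]
--                 if word3 in thrdict:
--                     thrdict[word3]+=1
--                 else:
--                     thrdict[word3]=1
--             else:
--                 bigdict[word2]={word3:1}
--         else:
--             smdict[word]={word2:{word3:1}}
--     return smdict
-- ===== SOURCE B (Python) =====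
-- def listtags(text, smdict):
--     # Recursive group-by: build the result top-down, one level at a time, by
--     # grouping the trigram list per key (no in-place mutation of smdict).
--     tris = list(zip(text, text[1:], text[2:]))
--     return _regroup3(smdict, tris)
--
-- def _order(old, new):
--     # key order: existing keys first, then new keys in first-occurrence order
--     return list(dict.fromkeys(list(old) + new))
--
-- def _groups(pairs):
--     g = {}
--     for k, v in pairs:
--         g.setdefault(k, []).append(v)
--     return g
--
-- def _regroup3(old, tris):
--     g = _groups([(a, (b, c)) for a, b, c in tris])
--     return {a: _regroup2(old.get(a, {}), g.get(a, []))
--             for a in _order(old, list(g))}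
--
-- def _regroup2(old, pairs):
--     g = _groups(pairs)
--     return {b: _regroup1(old.get(b, {}), g.get(b, []))
--             for b in _order(old, list(g))}
--
-- def _regroup1(old, cs):
--     t = {}
--     for c in cs:
--         t[c] = t.get(c, 0) + 1
--     return {c: old.get(c, 0) + t.get(c, 0) for c in _order(old, list(t))}
-- ===== Notes on version B (the rewrite author's own statement) =====
-- stated objective: alternative
-- what changed: A fills the nested dict incrementally, one position at a time, with membership-branch chains mutating smdict in place; B instead builds the result top-down by a recursive group-by: at each level it buckets the remaining tuple tails per key in one pass, computes the key order (existing keys then first occurrences), and constructs each sub-dict from that key's bucket (a tally at the leaf), returning a fresh dict without mutating smdict (the equivalence is about the return value).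
import Mathlib
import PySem

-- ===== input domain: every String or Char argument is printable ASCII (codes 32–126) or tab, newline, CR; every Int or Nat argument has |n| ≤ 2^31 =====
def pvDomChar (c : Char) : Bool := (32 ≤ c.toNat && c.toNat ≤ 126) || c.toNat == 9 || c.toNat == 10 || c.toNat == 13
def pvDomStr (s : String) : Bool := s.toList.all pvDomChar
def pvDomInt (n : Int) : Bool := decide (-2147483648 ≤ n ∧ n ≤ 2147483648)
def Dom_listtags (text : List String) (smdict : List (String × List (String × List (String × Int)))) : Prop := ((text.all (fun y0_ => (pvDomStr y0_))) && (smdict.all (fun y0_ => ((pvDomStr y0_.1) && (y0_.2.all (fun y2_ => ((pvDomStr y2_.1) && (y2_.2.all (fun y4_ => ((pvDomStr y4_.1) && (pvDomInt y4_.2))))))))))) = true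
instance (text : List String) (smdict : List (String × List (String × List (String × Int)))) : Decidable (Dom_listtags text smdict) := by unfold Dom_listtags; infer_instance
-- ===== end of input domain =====

-- B rebuilds the nested trigram-count dict top-down by a recursive group-by (key order, then
-- each sub-dict from the filtered trigrams) instead of A's incremental per-position updates;
-- A mutates smdict in place while B returns a fresh dict — the equivalence proved here is
-- about the RETURN value only.

-- Python-dict primitives on association lists (first match; overwrite keeps the position,
-- a new key is appended — exact for these ports' lookups and stores).
def aget? {κ ν : Type} [DecidableEq κ] (d : List (κ × ν)) (k : κ) : Option ν :=
  match d with
  | [] => none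
  | (k', v) :: t => if k' = k then some v else aget? t k

def aset {κ ν : Type} [DecidableEq κ] (d : List (κ × ν)) (k : κ) (v : ν) : List (κ × ν) :=
  match d with
  | [] => [(k, v)]
  | (k', v') :: t => if k' = k then (k, v) :: t else (k', v') :: aset t k v

def agetD {κ ν : Type} [DecidableEq κ] (d : List (κ × ν)) (k : κ) (dflt : ν) : ν :=
  (aget? d k).getD dflt

-- ===== PORT A =====
-- one iteration of A's loop body: the 'word in smdict' membership chains, branch for branch
def stepA (S : List (String × List (String × List (String × Int)))) (word word2 word3 : String) :
    List (String × List (String × List (String × Int))) :=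
  match aget? S word with
  | some bigdict =>
    match aget? bigdict word2 with
    | some thrdict =>
      match aget? thrdict word3 with
      | some n => aset S word (aset bigdict word2 (aset thrdict word3 (n + 1)))
      | none   => aset S word (aset bigdict word2 (aset thrdict word3 1))
    | none => aset S word (aset bigdict word2 [(word3, 1)])
  | none => aset S word [(word2, [(word3, 1)])]

def listtags (text : List String) (smdict : List (String × List (String × List (String × Int)))) : List (String × List (String × List (String × Int))) :=
  (PySem.List.pyRange 0 ((text.length : Int) - 2) 1).foldl
    (fun S i =>
      match PySem.List.pyGet? text i, PySem.List.pyGet? text (i + 1), PySem.List.pyGet? text (i + 2) with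
      | some word, some word2, some word3 => stepA S word word2 word3
      | _, _, _ => S)  -- unreachable: every i of range(0, len-2) is in range
    smdict

-- ===== PORT B =====
-- list(dict.fromkeys(list(old) + new)): existing keys first, then first occurrences
def firstOrder (old new : List String) : List String :=
  (old ++ new).foldl (fun acc k => if k ∈ acc then acc else acc ++ [k]) []

-- g.setdefault(k, []).append(v): extend the existing bucket in place, or append a new one
def bput {ν : Type} (g : List (String × List ν)) (k : String) (v : ν) : List (String × List ν) :=
  match aget? g k with
  | some l => aset g k (l ++ [v])
  | none   => g ++ [(k, [v])]

-- _groups(pairs): one pass bucketing the values per key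
def groups {ν : Type} (ps : List (String × ν)) : List (String × List ν) :=
  ps.foldl (fun g p => bput g p.1 p.2) []

-- the leaf tally loop: t[c] = t.get(c, 0) + 1
def tallyL (cs : List String) : List (String × Int) :=
  cs.foldl (fun t c => aset t c (agetD t c 0 + 1)) []

-- {c: old.get(c, 0) + t.get(c, 0) for c in _order(old, list(t))}
def regroup1 (old : List (String × Int)) (cs : List String) : List (String × Int) :=
  (firstOrder (old.map Prod.fst) ((tallyL cs).map Prod.fst)).map
    (fun c => (c, agetD old c 0 + agetD (tallyL cs) c 0))

def regroup2 (old : List (String × List (String × Int))) (ps : List (String × String)) :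
    List (String × List (String × Int)) :=
  (firstOrder (old.map Prod.fst) ((groups ps).map Prod.fst)).map
    (fun b => (b, regroup1 (agetD old b []) (agetD (groups ps) b [])))

-- the Python re-pairs (a, b, c) as (a, (b, c)); on this pair encoding that is the identity
def regroup3 (old : List (String × List (String × List (String × Int))))
    (tris : List (String × String × String)) :
    List (String × List (String × List (String × Int))) :=
  (firstOrder (old.map Prod.fst) ((groups tris).map Prod.fst)).map
    (fun a => (a, regroup2 (agetD old a []) (agetD (groups tris) a [])))

-- zip(text, text[1:], text[2:])
def trigramsB (text : List String) : List (String × String × String) :=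
  text.zip ((text.drop 1).zip (text.drop 2))

def listtags_alt (text : List String) (smdict : List (String × List (String × List (String × Int)))) : List (String × List (String × List (String × Int))) :=
  regroup3 smdict (trigramsB text)

-- ===== PRECONDITION & SPEC =====
-- Pre_ only demands that smdict is a genuine dict (no duplicate keys at any level);
-- every Python dict satisfies this, so no Python input A returns on is excluded.
def Pre_listtags (text : List String) (smdict : List (String × List (String × List (String × Int)))) : Prop :=
  (smdict.map Prod.fst).Nodup ∧
  ∀ p ∈ smdict, (p.2.map Prod.fst).Nodup ∧ ∀ q ∈ p.2, (q.2.map Prod.fst).Nodup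
instance (text : List String) (smdict : List (String × List (String × List (String × Int)))) : Decidable (Pre_listtags text smdict) := by unfold Pre_listtags; infer_instance

def pvWitness_listtags : List String × (List (String × List (String × List (String × Int)))) :=
  (["a", "b", "a", "b"], [("a", [("b", [("a", 2)])])])

def Spec_listtags (text : List String) (smdict : List (String × List (String × List (String × Int)))) (out : List (String × List (String × List (String × Int)))) : Prop := out = listtags_alt text smdict
instance (text : List String) (smdict : List (String × List (String × List (String × Int)))) (out : List (String × List (String × List (String × Int)))) : Decidable (Spec_listtags text smdict out) := by unfold Spec_listtags; infer_instance

-- ===== CLAIM (what is proved, stated in full; the proofs are below) =====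
def Claim_equal_listtags : Prop := ∀ (text : List String) (smdict : List (String × List (String × List (String × Int)))), Dom_listtags text smdict → Pre_listtags text smdict → Spec_listtags text smdict (listtags text smdict)

-- ===== LEMMAS AND PROOFS =====

-- proof-side characterization of B's levels: explicit filter / count per key
def fRegroup1 (old : List (String × Int)) (cs : List String) : List (String × Int) :=
  (firstOrder (old.map Prod.fst) cs).map (fun c => (c, agetD old c 0 + (cs.count c : Int)))

def fRegroup2 (old : List (String × List (String × Int))) (ps : List (String × String)) :
    List (String × List (String × Int)) :=
  (firstOrder (old.map Prod.fst) (ps.map Prod.fst)).map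
    (fun b => (b, fRegroup1 (agetD old b [])
      (ps.filterMap (fun p => if p.1 = b then some p.2 else none))))

def fRegroup3 (old : List (String × List (String × List (String × Int))))
    (tris : List (String × String × String)) :
    List (String × List (String × List (String × Int))) :=
  (firstOrder (old.map Prod.fst) (tris.map Prod.fst)).map
    (fun a => (a, fRegroup2 (agetD old a [])
      (tris.filterMap (fun t => if t.1 = a then some t.2 else none))))


-- basic assoc-list lemmas
theorem aget?_eq_none_of_not_mem {κ ν : Type} [DecidableEq κ] (d : List (κ × ν)) (k : κ)
    (h : k ∉ d.map Prod.fst) : aget? d k = none := by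
  induction d with
  | nil => rfl
  | cons hd t ih =>
    obtain ⟨k', v⟩ := hd
    simp only [List.map_cons, List.mem_cons, not_or] at h
    simp [aget?, Ne.symm h.1, ih h.2]

theorem aset_of_none {κ ν : Type} [DecidableEq κ] (d : List (κ × ν)) (k : κ) (v : ν)
    (h : aget? d k = none) : aset d k v = d ++ [(k, v)] := by
  induction d with
  | nil => simp [aset]
  | cons hd t ih =>
    obtain ⟨k₀, v₀⟩ := hd
    by_cases hk : k₀ = k
    · simp [aget?, hk] at h
    · simp [aget?, hk] at h
      simp [aset, hk, ih h]

-- lookup / store on a list of the shape K.map (fun k => (k, f k))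
theorem aget?_map_keys_mem {ν : Type} (K : List String) (f : String → ν) (a : String)
    (h : a ∈ K) : aget? (K.map (fun k => (k, f k))) a = some (f a) := by
  induction K with
  | nil => simp at h
  | cons k t ih =>
    by_cases hk : k = a
    · subst hk; simp [aget?]
    · rcases List.mem_cons.mp h with h | h
      · exact absurd h.symm hk
      · simp [aget?, hk, ih h]

theorem aget?_map_keys_not_mem {ν : Type} (K : List String) (f : String → ν) (a : String)
    (h : a ∉ K) : aget? (K.map (fun k => (k, f k))) a = none := by
  apply aget?_eq_none_of_not_mem
  simpa using h

theorem aset_map_keys_mem {ν : Type} (K : List String) (f : String → ν) (a : String) (v : ν)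
    (hnd : K.Nodup) (h : a ∈ K) :
    aset (K.map (fun k => (k, f k))) a v = K.map (fun k => (k, if k = a then v else f k)) := by
  induction K with
  | nil => simp at h
  | cons k t ih =>
    rcases List.nodup_cons.mp hnd with ⟨hkt, hnd'⟩
    by_cases hk : k = a
    · subst hk
      have h1 : aset ((k, f k) :: t.map (fun k => (k, f k))) k v
          = (k, v) :: t.map (fun k => (k, f k)) := by simp [aset]
      rw [List.map_cons, h1, List.map_cons, if_pos rfl]
      congr 1
      apply List.map_congr_left
      intro x hx
      have : x ≠ k := fun he => hkt (he ▸ hx)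
      simp [this]
    · rcases List.mem_cons.mp h with h | h
      · exact absurd h.symm hk
      · simp [aset, hk, ih hnd' h]

-- firstOrder: the foldl kernel and its properties
def fkAux (acc : List String) (l : List String) : List String :=
  l.foldl (fun acc k => if k ∈ acc then acc else acc ++ [k]) acc

theorem fkAux_append (acc l₁ l₂ : List String) :
    fkAux acc (l₁ ++ l₂) = fkAux (fkAux acc l₁) l₂ := by
  simp [fkAux, List.foldl_append]

theorem mem_fkAux (acc l : List String) (x : String) :
    x ∈ fkAux acc l ↔ x ∈ acc ∨ x ∈ l := by
  induction l generalizing acc with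
  | nil => simp [fkAux]
  | cons k t ih =>
    show x ∈ fkAux (if k ∈ acc then acc else acc ++ [k]) t ↔ _
    by_cases hk : k ∈ acc
    · rw [if_pos hk, ih]
      constructor
      · rintro (h | h); exact Or.inl h; exact Or.inr (List.mem_cons_of_mem _ h)
      · rintro (h | h); exact Or.inl h
        rcases List.mem_cons.mp h with h | h
        · exact Or.inl (h ▸ hk)
        · exact Or.inr h
    · rw [if_neg hk, ih]
      simp only [List.mem_append, List.mem_singleton, List.mem_cons]
      tauto
theorem nodup_fkAux (acc l : List String) (h : acc.Nodup) : (fkAux acc l).Nodup := by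
  induction l generalizing acc with
  | nil => exact h
  | cons k t ih =>
    show ((fkAux (if k ∈ acc then acc else acc ++ [k]) t)).Nodup
    by_cases hk : k ∈ acc
    · rw [if_pos hk]; exact ih _ h
    · rw [if_neg hk]
      apply ih
      simp only [List.nodup_append]
      refine ⟨h, List.nodup_singleton _, ?_⟩
      intro a ha b hb
      rw [List.mem_singleton] at hb
      subst hb
      exact fun he => hk (he ▸ ha)

theorem fkAux_of_nodup (acc l : List String) (hd : ∀ x ∈ l, x ∉ acc) (hn : l.Nodup) :
    fkAux acc l = acc ++ l := by
  induction l generalizing acc with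
  | nil => simp [fkAux]
  | cons k t ih =>
    rcases List.nodup_cons.mp hn with ⟨hkt, hn'⟩
    show fkAux (if k ∈ acc then acc else acc ++ [k]) t = _
    rw [if_neg (hd k (List.mem_cons_self ..))]
    rw [ih (acc ++ [k]) (fun x hx => by
      simp only [List.mem_append, List.mem_singleton, not_or]
      exact ⟨hd x (List.mem_cons_of_mem _ hx), fun he => hkt (he ▸ hx)⟩) hn']
    simp

theorem mem_firstOrder (old new : List String) (x : String) :
    x ∈ firstOrder old new ↔ x ∈ old ∨ x ∈ new := by
  show x ∈ fkAux [] (old ++ new) ↔ _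
  rw [mem_fkAux]; simp

theorem nodup_firstOrder (old new : List String) : (firstOrder old new).Nodup :=
  nodup_fkAux [] _ List.nodup_nil

theorem firstOrder_snoc (old new : List String) (a : String) :
    firstOrder old (new ++ [a]) =
      if a ∈ old ∨ a ∈ new then firstOrder old new else firstOrder old new ++ [a] := by
  show fkAux [] (old ++ (new ++ [a])) = _
  rw [← List.append_assoc, fkAux_append]
  show (if a ∈ fkAux [] (old ++ new) then fkAux [] (old ++ new) else fkAux [] (old ++ new) ++ [a]) = _
  have hiff : a ∈ fkAux [] (old ++ new) ↔ a ∈ old ∨ a ∈ new := by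
    rw [mem_fkAux]; simp
  by_cases hm : a ∈ old ∨ a ∈ new
  · rw [if_pos (hiff.mpr hm), if_pos hm]; rfl
  · rw [if_neg (fun hc => hm (hiff.mp hc)), if_neg hm]; rfl

theorem firstOrder_nil (l : List String) (h : l.Nodup) : firstOrder l [] = l := by
  show fkAux [] (l ++ []) = l
  rw [List.append_nil, fkAux_of_nodup [] l (by simp) h]
  simp

-- a nodup assoc list is reconstructed from its keys and lookups
theorem map_keys_getD_eq {ν : Type} (d : List (String × ν)) (dflt : ν)
    (h : (d.map Prod.fst).Nodup) :
    (d.map Prod.fst).map (fun k => (k, agetD d k dflt)) = d := by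
  induction d with
  | nil => rfl
  | cons hd t ih =>
    obtain ⟨k, v⟩ := hd
    rcases List.nodup_cons.mp h with ⟨hkt, hnd'⟩
    simp only [List.map_cons]
    congr 1
    · simp [agetD, aget?]
    · calc (t.map Prod.fst).map (fun x => (x, agetD ((k, v) :: t) x dflt))
          = (t.map Prod.fst).map (fun x => (x, agetD t x dflt)) := by
            apply List.map_congr_left
            intro x hx
            have hxk : k ≠ x := fun he => hkt (he ▸ hx)
            simp [agetD, aget?, hxk]
        _ = t := ih hnd'

theorem mem_of_aget?_keys {ν : Type} (d : List (String × ν)) (k : String)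
    (h : k ∈ d.map Prod.fst) : ∃ v, aget? d k = some v ∧ (k, v) ∈ d := by
  induction d with
  | nil => simp at h
  | cons hd t ih =>
    obtain ⟨k', v'⟩ := hd
    by_cases hk : k' = k
    · subst hk; exact ⟨v', by simp [aget?]⟩
    · simp only [List.map_cons, List.mem_cons] at h
      rcases h with h | h
      · exact absurd h.symm hk
      · obtain ⟨v, hv, hm⟩ := ih h
        exact ⟨v, by simp [aget?, hk, hv], List.mem_cons_of_mem _ hm⟩

-- the bump form of A's loop body (triple setdefault+increment)
def bump1 (thr : List (String × Int)) (c : String) : List (String × Int) :=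
  aset thr c (agetD thr c 0 + 1)

def bump2 (big : List (String × List (String × Int))) (b c : String) :
    List (String × List (String × Int)) :=
  aset big b (bump1 (agetD big b []) c)

theorem stepA_eq_bump (S : List (String × List (String × List (String × Int)))) (a b c : String) :
    stepA S a b c = aset S a (bump2 (agetD S a []) b c) := by
  unfold stepA bump2 bump1
  rcases hA : aget? S a with _ | big
  · simp [agetD, hA, aget?, aset]
  · rcases hB : aget? big b with _ | thr
    · simp [agetD, hA, hB, aget?, aset]
    · rcases hC : aget? thr c with _ | n
      · simp [agetD, hA, hB, hC, aget?]
      · simp [agetD, hA, hB, hC]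

-- snoc lemma, level 1
theorem fRegroup1_snoc (old : List (String × Int)) (cs : List String) (c : String) :
    fRegroup1 old (cs ++ [c]) = bump1 (fRegroup1 old cs) c := by
  unfold fRegroup1 bump1
  rw [firstOrder_snoc]
  by_cases h : c ∈ old.map Prod.fst ∨ c ∈ cs
  · rw [if_pos h]
    have hmem : c ∈ firstOrder (old.map Prod.fst) cs := (mem_firstOrder ..).mpr h
    rw [agetD, aget?_map_keys_mem _ _ _ hmem, Option.getD_some,
      aset_map_keys_mem _ _ _ _ (nodup_firstOrder ..) hmem]
    apply List.map_congr_left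
    intro x _
    by_cases hx : x = c
    · subst hx
      have : List.count x [x] = 1 := by simp
      simp [List.count_append, this]; ring
    · have : List.count x [c] = 0 := List.count_eq_zero.mpr (by simp [hx])
      simp [List.count_append, this, hx]
  · rw [if_neg h]
    push_neg at h
    have hnm : c ∉ firstOrder (old.map Prod.fst) cs := fun hc => by
      rcases (mem_firstOrder ..).mp hc with h' | h' <;> [exact h.1 h'; exact h.2 h']
    rw [agetD, aget?_map_keys_not_mem _ _ _ hnm, Option.getD_none,
      aset_of_none _ _ _ (aget?_map_keys_not_mem _ _ _ hnm), List.map_append]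
    congr 1
    · apply List.map_congr_left
      intro x hx
      have hxc : x ≠ c := fun he => hnm (he ▸ hx)
      have : List.count x [c] = 0 := List.count_eq_zero.mpr (by simp [hxc])
      simp [List.count_append, this]
    · have h0 : agetD old c 0 = 0 := by
        simp [agetD, aget?_eq_none_of_not_mem old c h.1]
      have hc0 : cs.count c = 0 := List.count_eq_zero.mpr h.2
      simp [List.count_append, h0, hc0]

-- filtered sublist of a snoc
theorem filterMap_key_snoc {α β : Type} [DecidableEq α] (ps : List (α × β)) (b : α) (c : β) (x : α) :
    (ps ++ [(b, c)]).filterMap (fun p => if p.1 = x then some p.2 else none) =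
      ps.filterMap (fun p => if p.1 = x then some p.2 else none) ++
        (if b = x then [c] else []) := by
  rw [List.filterMap_append]
  by_cases hb : b = x <;> simp [hb]

theorem filterMap_key_nil {α β : Type} [DecidableEq α] (ps : List (α × β)) (x : α)
    (h : x ∉ ps.map Prod.fst) :
    ps.filterMap (fun p => if p.1 = x then some p.2 else none) = [] := by
  rw [List.filterMap_eq_nil_iff]
  rintro ⟨k, v⟩ hm
  have : k ≠ x := fun he => h (he ▸ List.mem_map_of_mem hm)
  simp [this]

-- snoc lemma, level 2
theorem fRegroup2_snoc (old : List (String × List (String × Int))) (ps : List (String × String))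
    (b c : String) :
    fRegroup2 old (ps ++ [(b, c)]) = bump2 (fRegroup2 old ps) b c := by
  unfold fRegroup2 bump2
  rw [show (ps ++ [(b, c)]).map Prod.fst = ps.map Prod.fst ++ [b] by simp]
  rw [firstOrder_snoc]
  by_cases h : b ∈ old.map Prod.fst ∨ b ∈ ps.map Prod.fst
  · rw [if_pos h]
    have hmem : b ∈ firstOrder (old.map Prod.fst) (ps.map Prod.fst) := (mem_firstOrder ..).mpr h
    rw [agetD, aget?_map_keys_mem _ _ _ hmem, Option.getD_some,
      aset_map_keys_mem _ _ _ _ (nodup_firstOrder ..) hmem]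
    apply List.map_congr_left
    intro x _
    rw [filterMap_key_snoc]
    by_cases hx : x = b
    · subst hx
      simp [fRegroup1_snoc]
    · simp [Ne.symm hx, hx]
  · rw [if_neg h]
    push_neg at h
    have hnm : b ∉ firstOrder (old.map Prod.fst) (ps.map Prod.fst) := fun hb => by
      rcases (mem_firstOrder ..).mp hb with h' | h' <;> [exact h.1 h'; exact h.2 h']
    rw [agetD, aget?_map_keys_not_mem _ _ _ hnm, Option.getD_none,
      aset_of_none _ _ _ (aget?_map_keys_not_mem _ _ _ hnm), List.map_append]
    congr 1
    · apply List.map_congr_left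
      intro x hx
      have hxb : x ≠ b := fun he => hnm (he ▸ hx)
      rw [filterMap_key_snoc]
      simp [Ne.symm hxb]
    · have h0 : aget? old b = none := aget?_eq_none_of_not_mem old b h.1
      simp only [List.map_cons, List.map_nil]
      rw [filterMap_key_snoc, filterMap_key_nil _ _ h.2]
      simp [h0, fRegroup1, firstOrder, fkAux, bump1, agetD, aget?, aset]

-- snoc lemma, level 3
theorem fRegroup3_snoc (old : List (String × List (String × List (String × Int))))
    (L : List (String × String × String)) (a b c : String) :
    fRegroup3 old (L ++ [(a, b, c)]) = stepA (fRegroup3 old L) a b c := by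
  rw [stepA_eq_bump]
  unfold fRegroup3
  rw [show (L ++ [(a, b, c)]).map Prod.fst = L.map Prod.fst ++ [a] by simp]
  rw [firstOrder_snoc]
  by_cases h : a ∈ old.map Prod.fst ∨ a ∈ L.map Prod.fst
  · rw [if_pos h]
    have hmem : a ∈ firstOrder (old.map Prod.fst) (L.map Prod.fst) := (mem_firstOrder ..).mpr h
    rw [agetD, aget?_map_keys_mem _ _ _ hmem, Option.getD_some,
      aset_map_keys_mem _ _ _ _ (nodup_firstOrder ..) hmem]
    apply List.map_congr_left
    intro x _
    rw [filterMap_key_snoc]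
    by_cases hx : x = a
    · subst hx
      simp [fRegroup2_snoc]
    · simp [Ne.symm hx, hx]
  · rw [if_neg h]
    push_neg at h
    have hnm : a ∉ firstOrder (old.map Prod.fst) (L.map Prod.fst) := fun ha => by
      rcases (mem_firstOrder ..).mp ha with h' | h' <;> [exact h.1 h'; exact h.2 h']
    rw [agetD, aget?_map_keys_not_mem _ _ _ hnm, Option.getD_none,
      aset_of_none _ _ _ (aget?_map_keys_not_mem _ _ _ hnm), List.map_append]
    congr 1
    · apply List.map_congr_left
      intro x hx
      have hxa : x ≠ a := fun he => hnm (he ▸ hx)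
      rw [filterMap_key_snoc]
      simp [Ne.symm hxa]
    · have h0 : aget? old a = none := aget?_eq_none_of_not_mem old a h.1
      simp only [List.map_cons, List.map_nil]
      rw [filterMap_key_snoc, filterMap_key_nil _ _ h.2]
      simp [h0, fRegroup2, fRegroup1, firstOrder, fkAux, bump2, bump1, agetD, aget?, aset]

-- base cases: regrouping with no trigrams reproduces the dict (needs nodup keys)
theorem fRegroup1_nil (old : List (String × Int)) (h : (old.map Prod.fst).Nodup) :
    fRegroup1 old [] = old := by
  unfold fRegroup1
  rw [firstOrder_nil _ h]
  have := map_keys_getD_eq old (0 : Int) h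
  simpa using this

theorem fRegroup2_nil (old : List (String × List (String × Int)))
    (h : (old.map Prod.fst).Nodup) (h2 : ∀ q ∈ old, (q.2.map Prod.fst).Nodup) :
    fRegroup2 old [] = old := by
  unfold fRegroup2
  rw [show ([] : List (String × String)).map Prod.fst = [] from rfl, firstOrder_nil _ h]
  have key : ∀ x ∈ old.map Prod.fst,
      (x, fRegroup1 (agetD old x [])
        (([] : List (String × String)).filterMap (fun p => if p.1 = x then some p.2 else none)))
        = (x, agetD old x ([] : List (String × Int))) := by
    intro x hx
    obtain ⟨v, hv, hm⟩ := mem_of_aget?_keys old x hx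
    simp only [List.filterMap_nil]
    congr 1
    rw [show agetD old x [] = v from by simp [agetD, hv]]
    exact fRegroup1_nil v (h2 _ hm)
  calc (old.map Prod.fst).map (fun x => (x, fRegroup1 (agetD old x [])
        (([] : List (String × String)).filterMap (fun p => if p.1 = x then some p.2 else none))))
      = (old.map Prod.fst).map (fun x => (x, agetD old x [])) :=
        List.map_congr_left key
    _ = old := map_keys_getD_eq old [] h

theorem fRegroup3_nil (old : List (String × List (String × List (String × Int))))
    (h : Pre_listtags [] old) : fRegroup3 old [] = old := by
  obtain ⟨h1, h2⟩ := h
  unfold fRegroup3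
  rw [show ([] : List (String × String × String)).map Prod.fst = [] from rfl, firstOrder_nil _ h1]
  have key : ∀ x ∈ old.map Prod.fst,
      (x, fRegroup2 (agetD old x [])
        (([] : List (String × String × String)).filterMap (fun t => if t.1 = x then some t.2 else none)))
        = (x, agetD old x ([] : List (String × List (String × Int)))) := by
    intro x hx
    obtain ⟨v, hv, hm⟩ := mem_of_aget?_keys old x hx
    simp only [List.filterMap_nil]
    congr 1
    rw [show agetD old x [] = v from by simp [agetD, hv]]
    exact fRegroup2_nil v (h2 _ hm).1 (h2 _ hm).2
  calc (old.map Prod.fst).map (fun x => (x, fRegroup2 (agetD old x [])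
        (([] : List (String × String × String)).filterMap (fun t => if t.1 = x then some t.2 else none))))
      = (old.map Prod.fst).map (fun x => (x, agetD old x [])) :=
        List.map_congr_left key
    _ = old := map_keys_getD_eq old [] h1

-- bridge: A's index loop is a fold of stepA over the trigram list
def incF (S : List (String × List (String × List (String × Int)))) (t : String × String × String) :
    List (String × List (String × List (String × Int))) :=
  stepA S t.1 t.2.1 t.2.2

theorem trigramsB_eq_map_range (text : List String) :
    trigramsB text = (List.range (text.length - 2)).map
      (fun k => (text.getD k "", text.getD (k + 1) "", text.getD (k + 2) "")) := by
  apply List.ext_getElem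
  · simp [trigramsB]; omega
  · intro i hi hi'
    have hlen : i < text.length - 2 := by simpa using hi'
    have h0 : i < text.length := by omega
    have h1 : i + 1 < text.length := by omega
    have h2 : i + 2 < text.length := by omega
    simp [trigramsB, List.getElem_zip, h0, h1, h2, Nat.add_comm 2 i]

theorem listtags_eq_foldl_trigrams (text : List String)
    (S : List (String × List (String × List (String × Int)))) :
    listtags text S = (trigramsB text).foldl incF S := by
  unfold listtags
  rw [PySem.List.pyRange_one, List.foldl_map, trigramsB_eq_map_range, List.foldl_map]
  have hm : ((text.length : Int) - 2 - 0).toNat = text.length - 2 := by omega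
  rw [hm]
  apply PySem.List.foldl_congr_mem
  intro acc k hk
  rw [List.mem_range] at hk
  have h0 : k < text.length := by omega
  have h1 : k + 1 < text.length := by omega
  have h2 : k + 2 < text.length := by omega
  rw [show (0 : Int) + (k : Int) = ((k : Nat) : Int) from by omega]
  rw [show ((k : Int) + 1 : Int) = ((k + 1 : Nat) : Int) from by push_cast; ring]
  rw [show ((k : Int) + 2 : Int) = ((k + 2 : Nat) : Int) from by push_cast; ring]
  rw [PySem.List.pyGet?_natCast, PySem.List.pyGet?_natCast, PySem.List.pyGet?_natCast]
  simp [h0, h1, h2, incF]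

theorem foldl_incF_eq_fRegroup3 (L : List (String × String × String))
    (old : List (String × List (String × List (String × Int))))
    (h : Pre_listtags [] old) :
    L.foldl incF old = fRegroup3 old L := by
  induction L using List.reverseRecOn with
  | nil => exact (fRegroup3_nil old h).symm
  | append_singleton L t ih =>
    obtain ⟨a, b, c⟩ := t
    rw [List.foldl_append, List.foldl_cons, List.foldl_nil, ih, fRegroup3_snoc]
    rfl

-- lookups and keys after a store
theorem aget?_aset_self {κ ν : Type} [DecidableEq κ] (d : List (κ × ν)) (k : κ) (v : ν) :
    aget? (aset d k v) k = some v := by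
  induction d with
  | nil => simp [aset, aget?]
  | cons h t ih => obtain ⟨k', v'⟩ := h; by_cases hk : k' = k <;> simp [aset, aget?, hk, ih]

theorem aget?_aset_ne {κ ν : Type} [DecidableEq κ] (d : List (κ × ν)) (k k' : κ) (v : ν)
    (h : k ≠ k') : aget? (aset d k v) k' = aget? d k' := by
  induction d with
  | nil => simp [aset, aget?, h]
  | cons hd t ih =>
    obtain ⟨k₀, v₀⟩ := hd
    by_cases hk : k₀ = k
    · subst hk; simp [aset, aget?, h]
    · by_cases hk' : k₀ = k'
      · subst hk'; simp [aset, aget?, hk]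
      · simp [aset, aget?, hk, hk', ih]

theorem agetD_aset_self {κ ν : Type} [DecidableEq κ] (d : List (κ × ν)) (k : κ) (v dflt : ν) :
    agetD (aset d k v) k dflt = v := by
  simp [agetD, aget?_aset_self]

theorem agetD_aset_ne {κ ν : Type} [DecidableEq κ] (d : List (κ × ν)) (k k' : κ) (v dflt : ν)
    (h : k ≠ k') : agetD (aset d k v) k' dflt = agetD d k' dflt := by
  simp [agetD, aget?_aset_ne _ _ _ _ h]

theorem map_fst_aset_mem {κ ν : Type} [DecidableEq κ] (d : List (κ × ν)) (k : κ) (v l : ν)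
    (h : aget? d k = some l) : (aset d k v).map Prod.fst = d.map Prod.fst := by
  induction d with
  | nil => simp [aget?] at h
  | cons hd t ih =>
    obtain ⟨k₀, v₀⟩ := hd
    by_cases hk : k₀ = k
    · subst hk; simp [aset]
    · simp [aget?, hk] at h
      simp [aset, hk, ih h]

theorem not_mem_of_aget?_none {ν : Type} (d : List (String × ν)) (k : String)
    (h : aget? d k = none) : k ∉ d.map Prod.fst := by
  intro hm
  obtain ⟨v, hv, -⟩ := mem_of_aget?_keys d k hm
  rw [hv] at h
  cases h

theorem mem_of_aget?_some {ν : Type} (d : List (String × ν)) (k : String) (l : ν)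
    (h : aget? d k = some l) : k ∈ d.map Prod.fst := by
  by_contra hm
  rw [aget?_eq_none_of_not_mem d k hm] at h
  cases h

-- dedup on the right of firstOrder changes nothing
theorem fkAux_singleton (x : List String) (a : String) :
    fkAux x [a] = if a ∈ x then x else x ++ [a] := rfl

theorem fkAux_dedup (acc l : List String) : fkAux acc (fkAux [] l) = fkAux acc l := by
  induction l using List.reverseRecOn with
  | nil => rfl
  | append_singleton l a ih =>
    have h1 : fkAux [] (l ++ [a])
        = if a ∈ fkAux [] l then fkAux [] l else fkAux [] l ++ [a] := by
      rw [fkAux_append, fkAux_singleton]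
    by_cases ha : a ∈ fkAux [] l
    · rw [h1, if_pos ha, ih, fkAux_append, fkAux_singleton]
      have hmem : a ∈ fkAux acc l :=
        (mem_fkAux ..).mpr (Or.inr (((mem_fkAux [] l a).mp ha).resolve_left (by simp)))
      rw [if_pos hmem]
    · rw [h1, if_neg ha, fkAux_append, ih, ← fkAux_append]

theorem firstOrder_dedup (old new : List String) :
    firstOrder old (fkAux [] new) = firstOrder old new := by
  show fkAux [] (old ++ fkAux [] new) = fkAux [] (old ++ new)
  rw [fkAux_append, fkAux_dedup, ← fkAux_append]

-- the leaf tally computes counts, with first-occurrence key order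
theorem tallyL_snoc (cs : List String) (c : String) :
    tallyL (cs ++ [c]) = aset (tallyL cs) c (agetD (tallyL cs) c 0 + 1) := by
  simp [tallyL, List.foldl_append]

theorem tallyL_getD (cs : List String) (x : String) :
    agetD (tallyL cs) x 0 = (cs.count x : Int) := by
  induction cs using List.reverseRecOn with
  | nil => simp [tallyL, agetD, aget?]
  | append_singleton cs c ih =>
    rw [tallyL_snoc]
    by_cases hx : x = c
    · subst hx
      have : List.count x [x] = 1 := by simp
      rw [agetD_aset_self, ih]
      simp [List.count_append, this]
    · have : List.count x [c] = 0 := List.count_eq_zero.mpr (by simp [hx])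
      rw [agetD_aset_ne _ _ _ _ _ (fun he => hx he.symm), ih]
      simp [List.count_append, this]

theorem tallyL_keys (cs : List String) : (tallyL cs).map Prod.fst = fkAux [] cs := by
  induction cs using List.reverseRecOn with
  | nil => rfl
  | append_singleton cs c ih =>
    rw [tallyL_snoc, fkAux_append, fkAux_singleton]
    rcases hc : aget? (tallyL cs) c with _ | l
    · have hnm : c ∉ fkAux [] cs := ih ▸ not_mem_of_aget?_none _ _ hc
      rw [aset_of_none _ _ _ hc, if_neg hnm, List.map_append, ih]
      rfl
    · have hm : c ∈ fkAux [] cs := ih ▸ mem_of_aget?_some _ _ _ hc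
      rw [map_fst_aset_mem _ _ _ _ hc, if_pos hm, ih]

-- the bucket pass computes the per-key filtered sublists, with first-occurrence key order
theorem groups_snoc {ν : Type} (ps : List (String × ν)) (k : String) (v : ν) :
    groups (ps ++ [(k, v)]) = bput (groups ps) k v := by
  simp [groups, List.foldl_append]

theorem groups_keys {ν : Type} (ps : List (String × ν)) :
    (groups ps).map Prod.fst = fkAux [] (ps.map Prod.fst) := by
  induction ps using List.reverseRecOn with
  | nil => rfl
  | append_singleton ps p ih =>
    obtain ⟨k, v⟩ := p
    rw [groups_snoc, show (ps ++ [(k, v)]).map Prod.fst = ps.map Prod.fst ++ [k] by simp,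
      fkAux_append, fkAux_singleton]
    unfold bput
    rcases hk : aget? (groups ps) k with _ | l
    · have hnm : k ∉ fkAux [] (ps.map Prod.fst) := ih ▸ not_mem_of_aget?_none _ _ hk
      rw [if_neg hnm, List.map_append, ih]
      rfl
    · have hm : k ∈ fkAux [] (ps.map Prod.fst) := ih ▸ mem_of_aget?_some _ _ _ hk
      rw [map_fst_aset_mem _ _ _ _ hk, if_pos hm, ih]

theorem groups_getD {ν : Type} (ps : List (String × ν)) (x : String) :
    agetD (groups ps) x [] = ps.filterMap (fun p => if p.1 = x then some p.2 else none) := by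
  induction ps using List.reverseRecOn with
  | nil => rfl
  | append_singleton ps p ih =>
    obtain ⟨k, v⟩ := p
    rw [groups_snoc, filterMap_key_snoc]
    unfold bput
    rcases hk : aget? (groups ps) k with _ | l
    · rw [show groups ps ++ [(k, [v])] = aset (groups ps) k [v] from (aset_of_none _ _ _ hk).symm]
      by_cases hx : k = x
      · subst hx
        have hnp : k ∉ ps.map Prod.fst := fun hm => by
          have := not_mem_of_aget?_none _ _ hk
          rw [groups_keys] at this
          exact this ((mem_fkAux ..).mpr (Or.inr hm))
        rw [agetD_aset_self, filterMap_key_nil _ _ hnp, if_pos rfl]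
        rfl
      · rw [agetD_aset_ne _ _ _ _ _ hx, ih, if_neg hx, List.append_nil]
    · by_cases hx : k = x
      · subst hx
        rw [agetD_aset_self, if_pos rfl, ← ih]
        simp [agetD, hk]
      · rw [agetD_aset_ne _ _ _ _ _ hx, ih, if_neg hx, List.append_nil]

-- B's bucketed levels compute the filter/count characterization
theorem regroup1_eq_f (old : List (String × Int)) (cs : List String) :
    regroup1 old cs = fRegroup1 old cs := by
  unfold regroup1 fRegroup1
  rw [tallyL_keys, firstOrder_dedup]
  apply List.map_congr_left
  intro x _
  rw [tallyL_getD]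

theorem regroup2_eq_f (old : List (String × List (String × Int))) (ps : List (String × String)) :
    regroup2 old ps = fRegroup2 old ps := by
  unfold regroup2 fRegroup2
  rw [groups_keys, firstOrder_dedup]
  apply List.map_congr_left
  intro x _
  rw [groups_getD, regroup1_eq_f]

theorem regroup3_eq_f (old : List (String × List (String × List (String × Int))))
    (tris : List (String × String × String)) :
    regroup3 old tris = fRegroup3 old tris := by
  unfold regroup3 fRegroup3
  rw [groups_keys, firstOrder_dedup]
  apply List.map_congr_left
  intro x _
  rw [groups_getD, regroup2_eq_f]

-- ===== VERDICT (by name: the statement is the Claim_ definition above) =====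
theorem listtags_spec : Claim_equal_listtags := by
  intro text smdict _ hpre
  show listtags text smdict = listtags_alt text smdict
  rw [listtags_eq_foldl_trigrams, foldl_incF_eq_fRegroup3 _ _ hpre]
  unfold listtags_alt
  rw [regroup3_eq_f]
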